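-- pv_equiv track=rewrite | github.com/dbrindl1337/AdventOfCode | 2022/day3/solution/part_b.py | return_solution
-- ===== SOURCE A (Python) =====
-- def return_solution(rucksacks):
--
--     sum_of_items = 0
--
--     for n in range(0, len(rucksacks), 3):
--         first_rucksack = set(rucksacks[n])
--         second_rucksack = set(rucksacks[n + 1])
--         third_rucksack = set(rucksacks[n + 2])
--
--         duplicates_1_2 = [item if item in first_rucksack else 0 for item in second_rucksack]
--         duplicates_1_2__3 = [item if item in third_rucksack else 0 for item in duplicates_1_2]
--
--         sum_of_items += sum(duplicates_1_2__3)
--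
--     return sum_of_items
-- ===== SOURCE B (Python) =====
-- def return_solution(rucksacks):
--     total = 0
--     for n in range(0, len(rucksacks), 3):
--         counts = {}
--         for rucksack in (rucksacks[n], rucksacks[n + 1], rucksacks[n + 2]):
--             for item in set(rucksack):
--                 counts[item] = counts.get(item, 0) + 1
--         total += sum(item for item, cnt in counts.items() if cnt == 3)
--     return total
-- ===== Notes on version B (the rewrite author's own statement) =====
-- stated objective: alternative
-- what changed: Per group of three, B builds one frequency table (distinct item -> number of the three rucksacks containing it) and sums the items counted 3 times, replacing A's two chained membership-filter comprehensions over the second set.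
import Mathlib
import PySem

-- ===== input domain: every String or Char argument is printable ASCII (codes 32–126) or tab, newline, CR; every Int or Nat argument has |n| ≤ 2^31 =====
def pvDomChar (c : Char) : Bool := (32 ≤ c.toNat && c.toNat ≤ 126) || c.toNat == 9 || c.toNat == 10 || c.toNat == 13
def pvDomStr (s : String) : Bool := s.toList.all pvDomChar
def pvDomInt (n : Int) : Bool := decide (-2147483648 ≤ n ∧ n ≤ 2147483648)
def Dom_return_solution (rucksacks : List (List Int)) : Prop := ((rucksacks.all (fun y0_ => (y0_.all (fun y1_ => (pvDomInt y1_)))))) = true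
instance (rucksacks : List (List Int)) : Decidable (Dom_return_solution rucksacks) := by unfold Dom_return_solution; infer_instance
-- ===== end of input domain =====

-- B replaces A's two chained membership-filter comprehensions by a per-group frequency
-- table (count in how many of the three rucksack sets each item occurs; sum those with count 3);
-- an alternative decomposition, not claimed faster.

-- ===== PORT A =====
-- indexing rucksacks[n] raises IndexError out of range; Pre_ excludes those inputs, the
-- port's default [] is never reached inside Pre_.
def return_solution (rucksacks : List (List Int)) : Int :=
  (PySem.List.pyRange 0 rucksacks.length 3).foldl (fun sum_of_items n =>
    let first_rucksack : PySem.Set Int := PySem.Set.ofList (PySem.List.pyGetD rucksacks n [])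
    let second_rucksack : PySem.Set Int := PySem.Set.ofList (PySem.List.pyGetD rucksacks (n + 1) [])
    let third_rucksack : PySem.Set Int := PySem.Set.ofList (PySem.List.pyGetD rucksacks (n + 2) [])
    let duplicates_1_2 := second_rucksack.map
      (fun item => if PySem.Set.contains first_rucksack item then item else 0)
    let duplicates_1_2__3 := duplicates_1_2.map
      (fun item => if PySem.Set.contains third_rucksack item then item else 0)
    sum_of_items + duplicates_1_2__3.sum) 0

-- ===== PORT B =====
def return_solution_alt (rucksacks : List (List Int)) : Int :=
  (PySem.List.pyRange 0 rucksacks.length 3).foldl (fun total n =>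
    let group := [PySem.List.pyGetD rucksacks n [], PySem.List.pyGetD rucksacks (n + 1) [],
      PySem.List.pyGetD rucksacks (n + 2) []]
    let counts := group.foldl (fun counts rucksack =>
      (PySem.Set.ofList rucksack).foldl (fun counts item =>
        counts.insert item (counts.getD item 0 + 1)) counts)
      (PySem.Dict.empty : PySem.Dict Int Int)
    total + ((counts.items.filter (fun p => p.2 == (3 : Int))).map (fun p => p.1)).sum) 0

-- ===== PRECONDITION & SPEC =====
-- Pre_ excludes exactly the inputs where A raises IndexError (an incomplete last group).
def Pre_return_solution (rucksacks : List (List Int)) : Prop :=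
  rucksacks.length % 3 = 0
instance (rucksacks : List (List Int)) : Decidable (Pre_return_solution rucksacks) := by
  unfold Pre_return_solution; infer_instance

def pvWitness_return_solution : List (List Int) := [[1, 2], [2, 3], [2, 4]]

def Spec_return_solution (rucksacks : List (List Int)) (out : Int) : Prop :=
  out = return_solution_alt rucksacks
instance (rucksacks : List (List Int)) (out : Int) : Decidable (Spec_return_solution rucksacks out) := by
  unfold Spec_return_solution; infer_instance

-- ===== CLAIM =====
def Claim_equal_return_solution : Prop :=
  ∀ (rucksacks : List (List Int)), Dom_return_solution rucksacks →
    Pre_return_solution rucksacks → Spec_return_solution rucksacks (return_solution rucksacks)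

-- ===== LEMMAS AND PROOFS =====

-- sum of "x if p x else 0" over a list is the sum of the filtered list
theorem pv_sum_map_ite (l : List Int) (p : Int → Bool) :
    (l.map (fun x => if p x then x else 0)).sum = (l.filter p).sum := by
  induction l with
  | nil => rfl
  | cons x xs ih =>
    simp only [List.map_cons, List.sum_cons, List.filter_cons]
    by_cases h : p x = true <;> simp [h, ih]

-- the per-group equality: A's chained filters equal B's count-3 sum, for any three rucksacks
-- A's per-index body: pyGetD at an in-range Nat index is getElem
theorem pv_get (xs : List (List Int)) (m : Nat) (h : m < xs.length) :
    PySem.List.pyGetD xs (↑m) [] = xs[m] := by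
  rw [PySem.List.pyGetD_eq_getElem xs [] (by positivity) (by exact_mod_cast h)]
  simp

-- the per-group equality: A's chained filters equal B's count-3 sum, for any three rucksacks
theorem pv_group_eq (r1 r2 r3 : List Int) :
    (((PySem.Set.ofList r2).map
        (fun item => if PySem.Set.contains (PySem.Set.ofList r1) item then item else 0)).map
        (fun item => if PySem.Set.contains (PySem.Set.ofList r3) item then item else 0)).sum =
    (((List.foldl (fun counts rucksack =>
        (PySem.Set.ofList rucksack).foldl (fun counts item =>
          counts.insert item (counts.getD item 0 + 1)) counts)
        (PySem.Dict.empty : PySem.Dict Int Int)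
        [r1, r2, r3]).items.filter (fun p => p.2 == (3 : Int))).map (fun p => p.1)).sum := by
  rw [List.map_map]
  rw [List.map_congr_left (g := fun x => if ((PySem.Set.ofList r1).contains x &&
        (PySem.Set.ofList r3).contains x) then x else 0)
      (fun x _ => by
        by_cases h1 : x ∈ r1 <;> by_cases h3 : x ∈ r3 <;>
          simp [PySem.Set.mem_ofList, h1, h3])]
  rw [pv_sum_map_ite]
  simp only [List.foldl_cons, List.foldl_nil]
  set d := (PySem.Set.ofList r3).foldl (fun counts item =>
      counts.insert item (counts.getD item 0 + 1))
    ((PySem.Set.ofList r2).foldl (fun counts item =>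
      counts.insert item (counts.getD item 0 + 1))
    ((PySem.Set.ofList r1).foldl (fun counts item =>
      counts.insert item (counts.getD item 0 + 1)) (PySem.Dict.empty : PySem.Dict Int Int))) with hd
  have hnd : d.keys.Nodup := by
    rw [hd]
    apply PySem.Dict.nodup_keys_foldl_insert
    apply PySem.Dict.nodup_keys_foldl_insert
    apply PySem.Dict.nodup_keys_foldl_insert
    simp [PySem.Dict.keys_empty]
  have hget : ∀ v, d.getD v 0 = (List.count v (PySem.Set.ofList r1) : Int) +
      (List.count v (PySem.Set.ofList r2) : Int) + (List.count v (PySem.Set.ofList r3) : Int) := by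
    intro v
    rw [hd, PySem.Dict.getD_foldl_insert_add_one, PySem.Dict.getD_foldl_insert_add_one,
      PySem.Dict.getD_foldl_insert_add_one, PySem.Dict.getD_empty]
    ring
  have hkeys : ∀ v, v ∈ d.keys ↔ v ∈ PySem.Set.ofList r1 ∨ v ∈ PySem.Set.ofList r2 ∨
      v ∈ PySem.Set.ofList r3 := by
    intro v
    rw [hd, PySem.Dict.keys_foldl_insert, PySem.Dict.keys_foldl_insert,
      PySem.Dict.keys_foldl_insert, PySem.Dict.keys_empty]
    simp [PySem.Set.mem_update, or_assoc]
  rw [PySem.Dict.items_eq_map_keys d hnd 0, List.filter_map, List.map_map]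
  simp only [Function.comp_def, List.map_id']
  apply List.Perm.sum_eq
  rw [List.perm_ext_iff_of_nodup (List.Nodup.filter _ (PySem.Set.nodup_ofList r2))
    (List.Nodup.filter _ hnd)]
  intro a
  have b1 := List.nodup_iff_count_le_one.mp (PySem.Set.nodup_ofList r1) a
  have b2 := List.nodup_iff_count_le_one.mp (PySem.Set.nodup_ofList r2) a
  have b3 := List.nodup_iff_count_le_one.mp (PySem.Set.nodup_ofList r3) a
  have m1 : a ∈ PySem.Set.ofList r1 ↔ 0 < List.count a (PySem.Set.ofList r1) :=
    List.count_pos_iff.symm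
  have m2 : a ∈ PySem.Set.ofList r2 ↔ 0 < List.count a (PySem.Set.ofList r2) :=
    List.count_pos_iff.symm
  have m3 : a ∈ PySem.Set.ofList r3 ↔ 0 < List.count a (PySem.Set.ofList r3) :=
    List.count_pos_iff.symm
  simp only [List.mem_filter, Bool.and_eq_true, PySem.Set.contains_iff, beq_iff_eq,
    hkeys, hget, m1, m2, m3]
  omega

theorem return_solution_spec : Claim_equal_return_solution := by
  intro rucksacks _ hpre
  unfold Spec_return_solution return_solution return_solution_alt
  simp only [PySem.List.foldl_add]
  congr 1
  apply congrArg List.sum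
  apply List.map_congr_left
  intro n hn
  rw [PySem.List.mem_pyRange_iff_of_pos (by norm_num)] at hn
  obtain ⟨h0, hlt, hdvd⟩ := hn
  obtain ⟨m, rfl⟩ : ∃ m : ℕ, n = ↑m := ⟨n.toNat, (Int.toNat_of_nonneg h0).symm⟩
  have hpre' : rucksacks.length % 3 = 0 := hpre
  have hlt' : m < rucksacks.length := by exact_mod_cast hlt
  have hdvd' : 3 ∣ m := by omega
  have h2 : m + 2 < rucksacks.length := by omega
  have e1 : ((m : Int) + 1) = ((m + 1 : Nat) : Int) := by push_cast; ring
  have e2 : ((m : Int) + 2) = ((m + 2 : Nat) : Int) := by push_cast; ring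
  rw [e1, e2, pv_get _ _ (by omega), pv_get _ _ (by omega), pv_get _ _ (by omega)]
  exact pv_group_eq _ _ _
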